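-- pv_equiv track=rewrite | github.com/MarcSeemann/Mphys-Project | parameters_wf.py | start_idx_func
-- ===== SOURCE A (Python) =====
-- def start_idx_func(y, thres):
--     for i in range(len(y)-2):
--         if y[i] > thres:
--             if y[i+1] > thres:
--                 if y[i+2] > thres:
--                     if i != 0:
--                         idx_start = i-1
--                         break
--                     else:
--                         continue
--     return idx_start
-- ===== SOURCE B (Python) =====
-- def start_idx_func(y, thres):
--     count = 0
--     for i in range(len(y)):
--         count = count + 1 if y[i] > thres else 0
--         if count >= 3 and i >= 3:
--             return i - 3
--     raise ValueError("no 3 consecutive values above threshold")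
-- ===== Notes on version B (the rewrite author's own statement) =====
-- stated objective: alternative
-- what changed: B replaces A's forward triple-lookahead over range(len(y)-2) with a single run-length counter of consecutive above-threshold values; on no-match inputs (excluded by Pre_) A raises UnboundLocalError and B raises ValueError.
import Mathlib
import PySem

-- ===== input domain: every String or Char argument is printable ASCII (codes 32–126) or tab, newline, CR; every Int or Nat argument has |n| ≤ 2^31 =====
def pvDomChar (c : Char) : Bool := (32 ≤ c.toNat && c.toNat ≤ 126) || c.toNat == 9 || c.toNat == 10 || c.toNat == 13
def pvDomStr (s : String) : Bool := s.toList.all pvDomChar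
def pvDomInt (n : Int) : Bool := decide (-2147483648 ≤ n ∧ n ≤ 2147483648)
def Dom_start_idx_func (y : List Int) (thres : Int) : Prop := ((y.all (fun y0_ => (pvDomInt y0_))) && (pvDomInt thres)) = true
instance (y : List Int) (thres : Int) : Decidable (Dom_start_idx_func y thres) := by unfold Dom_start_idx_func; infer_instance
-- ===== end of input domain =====

-- B replaces A's forward triple-lookahead with a run-length counter of consecutive above-threshold
-- values (objective: alternative); on no-match inputs (outside Pre_) A raises UnboundLocalError and
-- B raises ValueError.

-- ===== PORT A =====
-- A's for-loop over range(len(y)-2): break returns some (i-1); falling off the loop end is Python's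
-- UnboundLocalError, modelled as none (those inputs are excluded by Pre_; getD 0 below is arbitrary).
def pvALoop (y : List Int) (thres : Int) (i : Nat) : Option Int :=
  if h : i + 2 < y.length then
    if y.getD i 0 > thres then
      if y.getD (i+1) 0 > thres then
        if y.getD (i+2) 0 > thres then
          if i ≠ 0 then some ((i : Int) - 1) else pvALoop y thres (i+1)
        else pvALoop y thres (i+1)
      else pvALoop y thres (i+1)
    else pvALoop y thres (i+1)
  else none
termination_by y.length - i
decreasing_by all_goals omega

def start_idx_func (y : List Int) (thres : Int) : Int :=
  (pvALoop y thres 0).getD 0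

-- ===== PORT B =====
-- falling off B's loop is Python's 'raise ValueError', modelled by the arbitrary value -1
-- (those inputs are excluded by Pre_)
def pvBLoop (y : List Int) (thres : Int) (i : Nat) (count : Nat) : Int :=
  if h : i < y.length then
    let count' := if y.getD i 0 > thres then count + 1 else 0
    if 3 ≤ count' ∧ 3 ≤ i then (i : Int) - 3
    else pvBLoop y thres (i+1) count'
  else -1
termination_by y.length - i
decreasing_by all_goals omega

def start_idx_func_alt (y : List Int) (thres : Int) : Int :=
  pvBLoop y thres 0 0

-- ===== PRECONDITION & SPEC =====
-- Pre_ excludes exactly the inputs on which A raises UnboundLocalError (no run of three values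
-- above thres starting at an index ≥ 1); A returns normally on every input satisfying Pre_.
def Pre_start_idx_func (y : List Int) (thres : Int) : Prop :=
  ∃ i < y.length, 1 ≤ i ∧ i + 2 < y.length ∧
    y.getD i 0 > thres ∧ y.getD (i+1) 0 > thres ∧ y.getD (i+2) 0 > thres
instance (y : List Int) (thres : Int) : Decidable (Pre_start_idx_func y thres) := by
  unfold Pre_start_idx_func; infer_instance

def pvWitness_start_idx_func : List Int × Int := ([0, 5, 5, 5], 0)

def Spec_start_idx_func (y : List Int) (thres : Int) (out : Int) : Prop := out = start_idx_func_alt y thres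
instance (y : List Int) (thres : Int) (out : Int) : Decidable (Spec_start_idx_func y thres out) := by unfold Spec_start_idx_func; infer_instance

-- ===== CLAIM (what is proved, stated in full; the proofs are below) =====
def Claim_equal_start_idx_func : Prop := ∀ (y : List Int) (thres : Int), Dom_start_idx_func y thres → Pre_start_idx_func y thres → Spec_start_idx_func y thres (start_idx_func y thres)

-- ===== LEMMAS AND PROOFS =====

lemma pvALoop_none_of_ge (y : List Int) (thres : Int) (j : Nat) (h : y.length ≤ j + 2) :
    pvALoop y thres j = none := by
  rw [pvALoop, dif_neg (by omega)]

-- one step of A's loop is skipped when the window [j, j+2] contains a position i with y[i] ≤ thres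
lemma pvALoop_step (y : List Int) (thres : Int) (i : Nat) (ht : ¬ y.getD i 0 > thres)
    (j : Nat) (h1 : i ≤ j + 2) (h2 : j ≤ i) :
    pvALoop y thres j = pvALoop y thres (j+1) := by
  by_cases hlt : j + 2 < y.length
  · rw [pvALoop, dif_pos hlt]
    have hij : i = j ∨ i = j + 1 ∨ i = j + 2 := by omega
    split_ifs with g1 g2 g3 g4 <;>
      first
        | rfl
        | (exfalso; rcases hij with h | h | h <;> subst h <;> first | exact ht g1 | exact ht g2 | exact ht g3)
  · rw [pvALoop_none_of_ge y thres j (by omega), pvALoop_none_of_ge y thres (j+1) (by omega)]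

lemma pvALoop_skip (y : List Int) (thres : Int) (i : Nat) (ht : ¬ y.getD i 0 > thres) :
    ∀ n j, i + 1 - j ≤ n → i ≤ j + 2 → j ≤ i + 1 →
      pvALoop y thres j = pvALoop y thres (i+1) := by
  intro n
  induction n with
  | zero =>
      intro j h1 h2 h3
      have : j = i + 1 := by omega
      rw [this]
  | succ n ih =>
      intro j h1 h2 h3
      by_cases hj : j = i + 1
      · rw [hj]
      · rw [pvALoop_step y thres i ht j h2 (by omega)]
        exact ih (j+1) (by omega) (by omega) (by omega)

lemma pvALoop_zero (y : List Int) (thres : Int) :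
    pvALoop y thres 0 = pvALoop y thres 1 := by
  by_cases h : 0 + 2 < y.length
  · rw [pvALoop, dif_pos h]
    split_ifs <;> simp_all
  · rw [pvALoop_none_of_ge y thres 0 (by omega), pvALoop_none_of_ge y thres 1 (by omega)]

-- invariant: `count` consecutive above-threshold values end just before i, so B from (i, count)
-- matches A's scan restarted at max 1 (i - min count 2)
lemma pvB_eq_pvA (y : List Int) (thres : Int) :
    ∀ n i c, y.length - i ≤ n → c ≤ i →
      (∀ k, k < min c 2 → y.getD (i - 1 - k) 0 > thres) →
      pvBLoop y thres i c = (pvALoop y thres (max 1 (i - min c 2))).getD (-1) := by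
  intro n
  induction n with
  | zero =>
      intro i c h hc hrun
      rw [pvBLoop, dif_neg (by omega), pvALoop_none_of_ge y thres _ (by omega)]
      rfl
  | succ n ih =>
      intro i c h hc hrun
      by_cases hi : i < y.length
      · rw [pvBLoop, dif_pos hi]
        by_cases ht : y.getD i 0 > thres
        · simp only [ht, if_pos]
          by_cases hf : 3 ≤ c + 1 ∧ 3 ≤ i
          · rw [if_pos hf]
            have hc2 : 2 ≤ c := by omega
            have hi3 : 3 ≤ i := hf.2
            have hj : max 1 (i - min c 2) = i - 2 := by omega
            rw [hj, pvALoop, dif_pos (by omega)]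
            have e0 : i - 2 + 1 = i - 1 - 0 := by omega
            have e1 : i - 2 + 2 = i := by omega
            have g0 : y.getD (i - 2) 0 > thres := by
              have := hrun 1 (by omega); simpa [show i - 1 - 1 = i - 2 by omega] using this
            have g1 : y.getD (i - 2 + 1) 0 > thres := by rw [e0]; exact hrun 0 (by omega)
            have g2 : y.getD (i - 2 + 2) 0 > thres := by rw [e1]; exact ht
            rw [if_pos g0, if_pos g1, if_pos g2, if_pos (by omega : i - 2 ≠ 0)]
            have : ((i - 2 : Nat) : Int) = (i : Int) - 2 := by omega
            simp [this]
            ring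
          · rw [if_neg hf]
            have hrw : max 1 (i + 1 - min (c+1) 2) = max 1 (i - min c 2) := by omega
            rw [ih (i+1) (c+1) (by omega) (by omega) ?_ , hrw]
            intro k hk
            match k with
            | 0 => simpa using ht
            | 1 =>
                have : 1 ≤ c := by omega
                have := hrun 0 (by omega)
                simpa [show i + 1 - 1 - 1 = i - 1 - 0 by omega] using this
            | (k + 2) => exact absurd hk (by omega)
        · simp only [ht, if_false]
          rw [if_neg (by omega)]
          rw [ih (i+1) 0 (by omega) (by omega) (by intro k hk; omega)]
          have h1 : max 1 (i + 1 - min 0 2) = i + 1 := by omega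
          rw [h1, pvALoop_skip y thres i ht 3 (max 1 (i - min c 2)) (by omega) (by omega) (by omega)]
      · rw [pvBLoop, dif_neg hi, pvALoop_none_of_ge y thres _ (by omega)]
        rfl

lemma pvALoop_isSome (y : List Int) (thres : Int) :
    ∀ n j, y.length - j ≤ n → 1 ≤ j →
      (∃ i, j ≤ i ∧ i + 2 < y.length ∧
        y.getD i 0 > thres ∧ y.getD (i+1) 0 > thres ∧ y.getD (i+2) 0 > thres) →
      (pvALoop y thres j).isSome := by
  intro n
  induction n with
  | zero =>
      intro j h hj ⟨i, hji, hilen, _⟩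
      omega
  | succ n ih =>
      intro j h hj ⟨i, hji, hilen, g0, g1, g2⟩
      have hlt : j + 2 < y.length := by omega
      rw [pvALoop, dif_pos hlt]
      split_ifs with e0 e1 e2 e3
      · simp
      · omega
      · refine ih (j+1) (by omega) (by omega) ⟨i, ?_, hilen, g0, g1, g2⟩
        rcases Nat.eq_or_lt_of_le hji with h' | h'
        · exact absurd (h' ▸ g2) e2
        · omega
      · refine ih (j+1) (by omega) (by omega) ⟨i, ?_, hilen, g0, g1, g2⟩
        rcases Nat.eq_or_lt_of_le hji with h' | h'
        · exact absurd (h' ▸ g1) e1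
        · omega
      · refine ih (j+1) (by omega) (by omega) ⟨i, ?_, hilen, g0, g1, g2⟩
        rcases Nat.eq_or_lt_of_le hji with h' | h'
        · exact absurd (h' ▸ g0) e0
        · omega

-- ===== VERDICT (by name: the statement is the Claim_ definition above) =====
theorem start_idx_func_spec : Claim_equal_start_idx_func := by
  intro y thres _ hpre
  unfold Spec_start_idx_func start_idx_func start_idx_func_alt
  obtain ⟨i, _, hi1, hilen, g0, g1, g2⟩ := hpre
  have hsome : (pvALoop y thres 1).isSome :=
    pvALoop_isSome y thres y.length 1 (by omega) (by omega) ⟨i, hi1, hilen, g0, g1, g2⟩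
  obtain ⟨v, hv⟩ := Option.isSome_iff_exists.mp hsome
  have hb := pvB_eq_pvA y thres (y.length) 0 0 (by omega) (by omega) (by intro k hk; omega)
  rw [show max 1 (0 - min 0 2) = 1 from by norm_num] at hb
  rw [hb, pvALoop_zero, hv]
  rfl
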